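-- pv_equiv track=rewrite | github.com/happyhob/Programmers | cording_basic_training/배열만들기.py | solution
-- ===== SOURCE A (Python) =====
-- def solution(arr):
--     stk = []
--     for i in range(0,len(arr)):
--         if stk ==[]:
--             stk.append(arr[i])
--         elif stk !=[] and stk[-1] == arr[i]:
--             stk.pop(-1)
--         elif stk !=[] and stk[-1] != arr[i]:
--             stk.append(arr[i])
--
--     if stk ==[]:
--         return [-1]
--     return stk
-- ===== SOURCE B (Python) =====
-- def solution(arr):
--     a = list(arr)
--     while True:
--         for i in range(len(a) - 1):
--             if a[i] == a[i + 1]: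
--                 del a[i:i + 2]
--                 break
--         else:
--             break
--     return a if a else [-1]
-- ===== Notes on version B (the rewrite author's own statement) =====
-- stated objective: alternative
-- what changed: Replaces the single-pass stack with repeated left-to-right scans that delete the first adjacent equal pair and rescan until a fixed point is reached (confluence of adjacent-pair removal gives the same normal form).
import Mathlib
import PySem

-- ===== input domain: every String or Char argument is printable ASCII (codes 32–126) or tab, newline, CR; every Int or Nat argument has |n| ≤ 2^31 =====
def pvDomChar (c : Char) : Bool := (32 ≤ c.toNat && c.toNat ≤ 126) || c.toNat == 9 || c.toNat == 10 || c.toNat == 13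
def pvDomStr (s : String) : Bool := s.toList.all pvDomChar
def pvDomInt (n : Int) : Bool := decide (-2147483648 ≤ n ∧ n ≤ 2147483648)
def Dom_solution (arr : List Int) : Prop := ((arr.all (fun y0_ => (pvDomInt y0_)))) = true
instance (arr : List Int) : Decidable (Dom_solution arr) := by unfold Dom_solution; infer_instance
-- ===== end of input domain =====

-- B replaces A's single-pass stack with repeated scans deleting the first adjacent equal
-- pair until a fixed point; same normal form by confluence (objective: alternative).


-- ===== PORT A =====
-- loop body: the three Python branches in order (the stack's top is its LAST element,
-- as in Python: append at the end, pop from the end)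
def solStep (stk : List Int) (x : Int) : List Int :=
  if stk = [] then stk ++ [x]
  else if stk.getLast? = some x then stk.dropLast
  else stk ++ [x]

def solution (arr : List Int) : List Int :=
  let stk := arr.foldl solStep []
  if stk = [] then [-1] else stk

-- ===== PORT B =====
-- index of the first i with a[i] = a[i+1] (B's inner for-scan)
def findPair : List Int → Option Nat
  | a :: b :: t => if a = b then some 0 else (findPair (b :: t)).map (· + 1)
  | _ => none

lemma findPair_le (l : List Int) (i : Nat) (h : findPair l = some i) : i + 2 ≤ l.length := by
  induction l generalizing i with
  | nil => simp [findPair] at h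
  | cons a t ih =>
    match t, h with
    | b :: t, h =>
      by_cases hab : a = b
      · simp [findPair, hab] at h
        simp [h.symm]
      · simp [findPair, hab, Option.map_eq_some_iff] at h
        obtain ⟨j, hj, rfl⟩ := h
        have := ih j hj
        simp at this ⊢
        omega

-- B's while loop: delete the first adjacent equal pair and rescan, until none remains
def reduceFix (l : List Int) : List Int :=
  match h : findPair l with
  | none => l
  | some i => reduceFix (l.take i ++ l.drop (i + 2))
termination_by l.length
decreasing_by
  have := findPair_le l i h
  simp [List.length_append, List.length_take, List.length_drop]
  omega

def solution_alt (arr : List Int) : List Int :=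
  let a := reduceFix arr
  if a = [] then [-1] else a

-- ===== PRECONDITION & SPEC =====
def Spec_solution (arr : List Int) (out : List Int) : Prop := out = solution_alt arr
instance (arr : List Int) (out : List Int) : Decidable (Spec_solution arr out) := by unfold Spec_solution; infer_instance

-- ===== CLAIM (what is proved, stated in full; the proofs are below) =====
def Claim_equal_solution : Prop := ∀ (arr : List Int), Dom_solution arr → Spec_solution arr (solution arr)

-- ===== LEMMAS AND PROOFS =====

-- proof-side stack with its top at the FRONT (mirror image of A's stack)
def fstep (s : List Int) (x : Int) : List Int :=
  if s.head? = some x then s.tail else x :: s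

lemma solStep_reverse (s : List Int) (x : Int) :
    (solStep s x).reverse = fstep s.reverse x := by
  rcases s.eq_nil_or_concat with rfl | ⟨t, y, rfl⟩
  · simp [solStep, fstep]
  · by_cases hyx : y = x
    · simp [solStep, fstep, hyx]
    · simp [solStep, fstep, hyx]

lemma foldl_solStep_reverse (l s : List Int) :
    l.foldl solStep s = (l.foldl fstep s.reverse).reverse := by
  induction l generalizing s with
  | nil => simp
  | cons x t ih =>
    simp only [List.foldl_cons]
    rw [ih, solStep_reverse]

lemma fstep_chain (s : List Int) (x : Int) (h : List.IsChain (· ≠ ·) s) :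
    List.IsChain (· ≠ ·) (fstep s x) := by
  match s with
  | [] => simp [fstep]
  | b :: t =>
    by_cases hbx : b = x
    · simpa [fstep, hbx] using h.tail
    · simp only [fstep, List.head?_cons]
      rw [if_neg (by simpa using hbx)]
      exact h.cons (by simpa using Ne.symm hbx)

lemma foldl_fstep_chain (l s : List Int) (h : List.IsChain (· ≠ ·) s) :
    List.IsChain (· ≠ ·) (l.foldl fstep s) := by
  induction l generalizing s with
  | nil => exact h
  | cons x t ih => exact ih _ (fstep_chain s x h)

lemma fstep_pair (s : List Int) (a : Int) (h : List.IsChain (· ≠ ·) s) :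
    fstep (fstep s a) a = s := by
  match s with
  | [] => simp [fstep]
  | b :: t =>
    by_cases hba : b = a
    · subst hba
      match t with
      | [] => simp [fstep]
      | c :: t' =>
        have hbc : b ≠ c := List.isChain_cons_cons.mp h |>.1
        simp [fstep, Ne.symm hbc]
    · simp [fstep, hba]

lemma foldl_fstep_remove_pair (xs ys s : List Int) (a : Int)
    (h : List.IsChain (· ≠ ·) s) :
    (xs ++ a :: a :: ys).foldl fstep s = (xs ++ ys).foldl fstep s := by
  rw [List.foldl_append, List.foldl_append, List.foldl_cons, List.foldl_cons,
    fstep_pair _ _ (foldl_fstep_chain xs s h)]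

lemma findPair_some_decomp (l : List Int) (i : Nat) (h : findPair l = some i) :
    ∃ a, l = l.take i ++ a :: a :: l.drop (i + 2) := by
  induction l generalizing i with
  | nil => simp [findPair] at h
  | cons a t ih =>
    match t with
    | [] => simp [findPair] at h
    | b :: t' =>
      by_cases hab : a = b
      · simp [findPair, hab] at h
        subst h
        exact ⟨b, by simp [hab]⟩
      · simp [findPair, hab, Option.map_eq_some_iff] at h
        obtain ⟨j, hj, rfl⟩ := h
        obtain ⟨c, hc⟩ := ih j hj
        refine ⟨c, ?_⟩
        simpa [List.take_succ_cons, List.drop_succ_cons] using congrArg (a :: ·) hc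

lemma findPair_none_chain (l : List Int) (h : findPair l = none) :
    List.IsChain (· ≠ ·) l := by
  induction l with
  | nil => exact List.isChain_nil
  | cons a t ih =>
    match t with
    | [] => exact List.isChain_singleton a
    | b :: t' =>
      by_cases hab : a = b
      · simp [findPair, hab] at h
      · simp only [findPair, if_neg hab, Option.map_eq_none_iff] at h
        exact List.isChain_cons_cons.mpr ⟨hab, ih h⟩

lemma reduceFix_shrink (l : List Int) (i : Nat) (hi : findPair l = some i) :
    (l.take i ++ l.drop (i + 2)).length < l.length := by
  have := findPair_le l i hi
  simp [List.length_append, List.length_take, List.length_drop]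
  omega

lemma reduceFix_foldl_aux (n : Nat) : ∀ l : List Int, l.length ≤ n →
    (reduceFix l).foldl fstep [] = l.foldl fstep [] := by
  induction n with
  | zero =>
    intro l hl
    match l, hl with
    | [], _ => simp [reduceFix, findPair]
  | succ n ih =>
    intro l hl
    rw [reduceFix]
    split
    · rfl
    · rename_i i hi
      obtain ⟨a, ha⟩ := findPair_some_decomp l i hi
      have hrec := ih (l.take i ++ l.drop (i + 2))
        (by have := reduceFix_shrink l i hi; omega)
      rw [hrec]
      conv_rhs => rw [ha]
      exact (foldl_fstep_remove_pair _ _ [] a List.isChain_nil).symm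

lemma reduceFix_irred_aux (n : Nat) : ∀ l : List Int, l.length ≤ n →
    findPair (reduceFix l) = none := by
  induction n with
  | zero =>
    intro l hl
    match l, hl with
    | [], _ => simp [reduceFix, findPair]
  | succ n ih =>
    intro l hl
    rw [reduceFix]
    split
    · assumption
    · rename_i i hi
      exact ih _ (by have := reduceFix_shrink l i hi; omega)

lemma foldl_fstep_irred (l : List Int) (s : List Int)
    (h : List.IsChain (· ≠ ·) l)
    (hs : ∀ a, l.head? = some a → s.head? ≠ some a) :
    l.foldl fstep s = l.reverse ++ s := by
  induction l generalizing s with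
  | nil => simp
  | cons x t ih =>
    have hx : fstep s x = x :: s := by
      simp only [fstep]
      rw [if_neg (hs x (by simp))]
    have htail : List.IsChain (· ≠ ·) t := h.tail
    have hcond : ∀ a, t.head? = some a → (x :: s).head? ≠ some a := by
      intro a ha hxa
      have hx_a : x = a := by simpa using hxa
      exact absurd hx_a ((List.isChain_cons.mp h).1 a ha)
    rw [List.foldl_cons, hx, ih (x :: s) htail hcond]
    simp

lemma reduceFix_normal (l : List Int) :
    (l.foldl fstep []).reverse = reduceFix l := by
  have h1 := reduceFix_foldl_aux l.length l le_rfl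
  have h2 := foldl_fstep_irred (reduceFix l) []
    (findPair_none_chain _ (reduceFix_irred_aux l.length l le_rfl)) (by simp)
  rw [← h1, h2]
  simp

-- ===== VERDICT (by name: the statement is the Claim_ definition above) =====
theorem solution_spec : Claim_equal_solution := by
  intro arr _
  unfold Spec_solution solution solution_alt
  rw [foldl_solStep_reverse]
  simp only [List.reverse_nil]
  rw [reduceFix_normal]
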